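-- pv_equiv track=rewrite | github.com/flappybird1084/corner-maze-rl | src/corner_maze_rl/yoking/map_to_minigrid_actions.py | match_well_rewards
-- ===== SOURCE A (Python) =====
-- WELL_POSITIONS = {(1, 1), (11, 1), (1, 11), (11, 11)}
--
-- def match_well_rewards(runs, timestamps, reward_events):
--     """For each well visit run, check if it aligns with a reward event.
--
--     Uses non-sequential matching: each reward event is independently matched
--     to the well run that contains its timestamp, allowing unrewarded well
--     visits to appear between rewarded ones without breaking alignment.
--
--     Returns a set of run indices that are rewarded.
--     """
--     rewarded_indices = set()
--
--     # Build index of well runs by position for fast lookup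
--     well_runs_by_pos = {}
--     for ri, (gx, gy, start, end) in enumerate(runs):
--         pos = (gx, gy)
--         if pos in WELL_POSITIONS:
--             run_start = timestamps[start]
--             run_end = timestamps[min(end - 1, len(timestamps) - 1)]
--             well_runs_by_pos.setdefault(pos, []).append((ri, run_start, run_end))
--
--     for reward_ts, reward_pos in reward_events:
--         candidates = well_runs_by_pos.get(reward_pos, [])
--         for ri, run_start, run_end in candidates:
--             if run_start <= reward_ts <= run_end + 1000:
--                 rewarded_indices.add(ri)
--                 break
--
--     return rewarded_indices
-- ===== SOURCE B (Python) =====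
-- WELL_POSITIONS = {(1, 1), (11, 1), (1, 11), (11, 11)}
--
-- def match_well_rewards(runs, timestamps, reward_events):
--     """Direct per-event scan: no index of well runs is built; each reward
--     event is matched to the first run at its well position whose time
--     window contains the event timestamp."""
--     n = len(timestamps)
--     rewarded = set()
--     for reward_ts, reward_pos in reward_events:
--         if reward_pos not in WELL_POSITIONS:
--             continue
--         for ri, (gx, gy, start, end) in enumerate(runs):
--             if (gx, gy) == reward_pos and \
--                timestamps[start] <= reward_ts <= timestamps[min(end - 1, n - 1)] + 1000:
--                 rewarded.add(ri)
--                 break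
--     return rewarded
-- ===== Notes on version B (the rewrite author's own statement) =====
-- stated objective: simpler
-- what changed: B drops A's index-building pass (the well_runs_by_pos dict of precomputed run windows) and instead matches each reward event by a single direct scan over the runs, computing each run's time window inline.
import Mathlib
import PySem

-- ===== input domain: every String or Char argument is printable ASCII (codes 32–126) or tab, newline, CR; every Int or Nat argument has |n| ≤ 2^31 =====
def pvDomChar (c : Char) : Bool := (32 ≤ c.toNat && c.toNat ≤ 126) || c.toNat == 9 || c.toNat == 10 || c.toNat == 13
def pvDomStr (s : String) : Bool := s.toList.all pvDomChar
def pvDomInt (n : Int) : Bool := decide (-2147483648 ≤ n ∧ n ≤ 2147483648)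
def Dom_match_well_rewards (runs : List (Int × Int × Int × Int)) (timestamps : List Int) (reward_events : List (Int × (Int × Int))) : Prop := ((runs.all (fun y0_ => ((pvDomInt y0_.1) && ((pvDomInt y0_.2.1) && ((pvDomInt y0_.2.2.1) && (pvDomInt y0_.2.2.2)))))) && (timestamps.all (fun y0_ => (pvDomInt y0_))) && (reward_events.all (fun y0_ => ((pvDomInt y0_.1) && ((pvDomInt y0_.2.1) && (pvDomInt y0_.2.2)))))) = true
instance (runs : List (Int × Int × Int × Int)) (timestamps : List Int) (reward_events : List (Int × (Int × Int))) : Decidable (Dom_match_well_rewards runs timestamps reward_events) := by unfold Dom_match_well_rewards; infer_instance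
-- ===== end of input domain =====

-- B drops A's index-building pass and matches each reward event by a direct scan
-- over the runs (objective: simpler); equivalence is about the RETURN value.

-- ===== PORT A =====
-- WELL_POSITIONS = {(1, 1), (11, 1), (1, 11), (11, 11)}
def pvWell : PySem.Set (Int × Int) := PySem.Set.ofList [(1, 1), (11, 1), (1, 11), (11, 11)]

-- timestamps[start]  (shared subexpression of both Pythons)
def pvRunStart (timestamps : List Int) (r : Int × Int × Int × Int) : Int :=
  PySem.List.pyGetD timestamps r.2.2.1 0

-- timestamps[min(end - 1, len(timestamps) - 1)]
def pvRunEnd (timestamps : List Int) (r : Int × Int × Int × Int) : Int :=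
  PySem.List.pyGetD timestamps (min (r.2.2.2 - 1) ((timestamps.length : Int) - 1)) 0

-- the well_runs_by_pos dict: setdefault(pos, []).append(t) = modify pos [] (· ++ [t])
def pvBuild (timestamps : List Int) (runs : List (Int × Int × Int × Int)) :
    PySem.Dict (Int × Int) (List (Int × Int × Int)) :=
  (PySem.List.enumerate runs).foldl
    (fun d p =>
      if PySem.Set.contains pvWell (p.2.1, p.2.2.1) then
        d.modify (p.2.1, p.2.2.1) []
          (· ++ [(p.1, pvRunStart timestamps p.2, pvRunEnd timestamps p.2)])
      else d)
    PySem.Dict.empty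

def match_well_rewards (runs : List (Int × Int × Int × Int)) (timestamps : List Int) (reward_events : List (Int × (Int × Int))) : List Int :=
  let d := pvBuild timestamps runs
  reward_events.foldl
    (fun s ev =>
      -- for ri, run_start, run_end in candidates: if …: add; break
      match (d.getD ev.2 []).find?
          (fun c => decide (c.2.1 ≤ ev.1) && decide (ev.1 ≤ c.2.2 + 1000)) with
      | some c => PySem.Set.add s c.1
      | none => s)
    PySem.Set.empty

-- ===== PORT B =====
def match_well_rewards_alt (runs : List (Int × Int × Int × Int)) (timestamps : List Int) (reward_events : List (Int × (Int × Int))) : List Int :=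
  reward_events.foldl
    (fun s ev =>
      if PySem.Set.contains pvWell ev.2 then
        -- first run at that position whose window contains the timestamp
        match (PySem.List.enumerate runs).find?
            (fun p => decide ((p.2.1, p.2.2.1) = ev.2)
              && decide (pvRunStart timestamps p.2 ≤ ev.1)
              && decide (ev.1 ≤ pvRunEnd timestamps p.2 + 1000)) with
        | some p => PySem.Set.add s p.1
        | none => s
      else s)
    PySem.Set.empty

-- ===== PRECONDITION & SPEC =====
-- Pre_ excludes exactly the inputs where A raises IndexError: a run at a well
-- position whose start index, or min(end-1, len(timestamps)-1), is out of range.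
def Pre_match_well_rewards (runs : List (Int × Int × Int × Int)) (timestamps : List Int) (reward_events : List (Int × (Int × Int))) : Prop :=
  ∀ r ∈ runs, (r.1, r.2.1) ∈ pvWell →
    PySem.Raise.InRange timestamps.length r.2.2.1 ∧
    PySem.Raise.InRange timestamps.length (min (r.2.2.2 - 1) ((timestamps.length : Int) - 1))
instance (runs : List (Int × Int × Int × Int)) (timestamps : List Int) (reward_events : List (Int × (Int × Int))) : Decidable (Pre_match_well_rewards runs timestamps reward_events) := by unfold Pre_match_well_rewards; infer_instance

def pvWitness_match_well_rewards : (List (Int × Int × Int × Int)) × List Int × (List (Int × (Int × Int))) :=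
  ([(1, 1, 0, 1), (11, 1, 1, 2)], [10, 50], [(12, (1, 1)), (2000, (11, 1))])

def Spec_match_well_rewards (runs : List (Int × Int × Int × Int)) (timestamps : List Int) (reward_events : List (Int × (Int × Int))) (out : List Int) : Prop := out = match_well_rewards_alt runs timestamps reward_events
instance (runs : List (Int × Int × Int × Int)) (timestamps : List Int) (reward_events : List (Int × (Int × Int))) (out : List Int) : Decidable (Spec_match_well_rewards runs timestamps reward_events out) := by unfold Spec_match_well_rewards; infer_instance

-- ===== CLAIM (what is proved, stated in full; the proofs are below) =====
def Claim_equal_match_well_rewards : Prop := ∀ (runs : List (Int × Int × Int × Int)) (timestamps : List Int) (reward_events : List (Int × (Int × Int))), Dom_match_well_rewards runs timestamps reward_events → Pre_match_well_rewards runs timestamps reward_events → Spec_match_well_rewards runs timestamps reward_events (match_well_rewards runs timestamps reward_events)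

-- ===== LEMMAS AND PROOFS =====

-- the dict lookup of A is the filtered, decorated run list
theorem getD_pvBuild_aux (ts : List Int)
    (l : List (Int × (Int × Int × Int × Int)))
    (d : PySem.Dict (Int × Int) (List (Int × Int × Int))) (pos : Int × Int) :
    (l.foldl
      (fun d p =>
        if PySem.Set.contains pvWell (p.2.1, p.2.2.1) then
          d.modify (p.2.1, p.2.2.1) []
            (· ++ [(p.1, pvRunStart ts p.2, pvRunEnd ts p.2)])
        else d) d).getD pos [] =
    d.getD pos [] ++
      l.filterMap (fun p =>
        if PySem.Set.contains pvWell (p.2.1, p.2.2.1) ∧ (p.2.1, p.2.2.1) = pos then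
          some (p.1, pvRunStart ts p.2, pvRunEnd ts p.2)
        else none) := by
  induction l generalizing d with
  | nil => simp
  | cons p l ih =>
    simp only [List.foldl_cons, List.filterMap_cons]
    by_cases hw : PySem.Set.contains pvWell (p.2.1, p.2.2.1)
    · rw [if_pos hw, ih]
      by_cases hp : (p.2.1, p.2.2.1) = pos
      · rw [if_pos ⟨hw, hp⟩, hp, PySem.Dict.getD_modify]
        simp
      · rw [if_neg (fun h => hp h.2), PySem.Dict.getD_modify, if_neg (fun h => hp h.symm)]
    · rw [if_neg hw, ih, if_neg (fun h => hw h.1)]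

-- find? over the decorated filtered list = find? over the raw enumerated list
theorem find?_filterMap_aux (ts : List Int) (ev : Int × (Int × Int))
    (hw : PySem.Set.contains pvWell ev.2 = true)
    (l : List (Int × (Int × Int × Int × Int))) :
    (l.filterMap (fun p =>
        if PySem.Set.contains pvWell (p.2.1, p.2.2.1) ∧ (p.2.1, p.2.2.1) = ev.2 then
          some (p.1, pvRunStart ts p.2, pvRunEnd ts p.2)
        else none)).find?
        (fun c => decide (c.2.1 ≤ ev.1) && decide (ev.1 ≤ c.2.2 + 1000)) =
    (l.find? (fun p => decide ((p.2.1, p.2.2.1) = ev.2)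
        && decide (pvRunStart ts p.2 ≤ ev.1)
        && decide (ev.1 ≤ pvRunEnd ts p.2 + 1000))).map
      (fun p => (p.1, pvRunStart ts p.2, pvRunEnd ts p.2)) := by
  induction l with
  | nil => simp
  | cons p l ih =>
    rw [List.filterMap_cons]
    by_cases hp : (p.2.1, p.2.2.1) = ev.2
    · rw [if_pos ⟨hp ▸ hw, hp⟩]
      by_cases h1 : pvRunStart ts p.2 ≤ ev.1
      · by_cases h2 : ev.1 ≤ pvRunEnd ts p.2 + 1000
        · rw [List.find?_cons_of_pos (by simp [h1, h2]),
            List.find?_cons_of_pos (by simp [hp, h1, h2])]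
          rfl
        · rw [List.find?_cons_of_neg (by simp [h2]),
            List.find?_cons_of_neg (by simp [h2]), ih]
      · rw [List.find?_cons_of_neg (by simp [h1]),
          List.find?_cons_of_neg (by simp [h1]), ih]
    · rw [if_neg (fun h => hp h.2), List.find?_cons_of_neg (by simp [hp]), ih]

-- when the event position is not a well, A finds no candidate
theorem getD_pvBuild_not_well (ts : List Int) (runs : List (Int × Int × Int × Int))
    (pos : Int × Int) (hw : ¬ PySem.Set.contains pvWell pos = true) :
    (pvBuild ts runs).getD pos [] = [] := by
  rw [pvBuild, getD_pvBuild_aux]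
  simp only [PySem.Dict.getD_empty, List.nil_append, List.filterMap_eq_nil_iff]
  intro p _
  by_cases hp : (p.2.1, p.2.2.1) = pos
  · rw [if_neg (fun h => hw (hp ▸ h.1))]
  · rw [if_neg (fun h => hp h.2)]

theorem match_well_rewards_eq_alt (runs : List (Int × Int × Int × Int))
    (timestamps : List Int) (reward_events : List (Int × (Int × Int))) :
    match_well_rewards runs timestamps reward_events =
    match_well_rewards_alt runs timestamps reward_events := by
  unfold match_well_rewards match_well_rewards_alt
  apply PySem.List.foldl_congr_mem
  intro s ev _
  by_cases hw : PySem.Set.contains pvWell ev.2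
  · rw [if_pos hw, pvBuild, getD_pvBuild_aux]
    rw [PySem.Dict.getD_empty, List.nil_append, find?_filterMap_aux timestamps ev hw]
    cases (PySem.List.enumerate runs).find?
        (fun p => decide ((p.2.1, p.2.2.1) = ev.2)
          && decide (pvRunStart timestamps p.2 ≤ ev.1)
          && decide (ev.1 ≤ pvRunEnd timestamps p.2 + 1000)) with
    | none => rfl
    | some p => rfl
  · rw [if_neg hw, getD_pvBuild_not_well timestamps runs ev.2 hw]
    rfl

-- ===== VERDICT (by name: the statement is the Claim_ definition above) =====
theorem match_well_rewards_spec : Claim_equal_match_well_rewards := by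
  intro runs timestamps reward_events _ _
  unfold Spec_match_well_rewards
  exact match_well_rewards_eq_alt runs timestamps reward_events
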